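-- pv_equiv track=rewrite | github.com/isoomni/coding-test | soom/Samsung/20058_마법사 상어와 파이어스톰.py | rotate_and_melting
-- ===== SOURCE A (Python) =====
-- dx = [-1, 0, 1, 0]
--
-- dy = [0, 1, 0, -1]
--
-- def rotate_and_melting(data, len_data, level):
--     '''회전'''
--     term = 2**level
--     for x in range(0, len_data, term):
--         for y in range(0, len_data, term):
--             temp = [data[i][y:y + term] for i in range(x, x + term)]
--             for i in range(term):  # 다음 격자까지의 거리 term이다.   열 인덱스
--                 for j in range(term): # 다음 격자까지의 거리 term이다.   행 인덱스
--                     # 현재 격자의 N번째 열을  다음 격자의 N번째 행으로 바뀌도록 구성하면 된다.(90도 회전)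
--                     # N번째 열의 첫번째 원소는 N번째 행의 마지막 원소로, N번째 열의 마지막 원소는 N번째 원소의 첫번째 원소로 바뀌게 된다.
--                     # (N번째 열 원소의 순서를 반전시키며 N번째 행으로 변환)
--                     data[x+j][y+term-i-1] = temp[i][j]
--
--     '''인접한 얼음 제거'''
--     # 인접한 얼음을 비교하여, 3개 이상이 아닌 경우 얼음의 양 1 감소
--     cnt = [[0] * len_data for i in range(len_data)]
--     for i in range(len_data):
--         for j in range(len_data):
--             for k in range(4):
--                 nx, ny = i + dx[k], j + dy[k]
--                 if 0 <= nx < len_data and 0 <= ny < len_data and data[nx][ny]: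
--                     cnt[i][j] += 1
--
--     # 인접한 얼음을 세는 것과 제거하는 것은 동시에 할 수 없다.
--     # 그러므로 따로 제거해준다.
--     for i in range(len_data):
--         for j in range(len_data):
--             if data[i][j] > 0 and cnt[i][j] < 3:
--                 data[i][j] -= 1
--
--     # 남아 있는 얼음의 양
--
--     return data
-- ===== SOURCE B (Python) =====
-- def rotate_and_melting(data, len_data, level):
--     t = 2 ** level
--     # rotation: per horizontal band of t rows, rotate every t-block with the
--     # transpose-of-reversed-rows idiom and rebuild the band's rows whole
--     for x in range(0, len_data, t):
--         band = data[x:x + t]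
--         rots = [list(zip(*[row[y:y + t] for row in band][::-1]))
--                 for y in range(0, len_data, t)]
--         for i in range(t):
--             data[x + i] = [v for blk in rots for v in blk[i]]
--     # melt: neighbour counts as a sum of four whole-grid shifts of the icy mask
--     ice = [[1 if v else 0 for v in row] for row in data]
--     zrow = [0] * len_data
--     up = ice[1:] + [zrow]
--     down = [zrow] + ice[:-1]
--     left = [r[1:] + [0] for r in ice]
--     right = [[0] + r[:-1] for r in ice]
--     for i in range(len_data):
--         data[i] = [v - 1 if v > 0 and u + d + l + r < 3 else v
--                    for v, u, d, l, r in zip(data[i], up[i], down[i], left[i], right[i])]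
--     return data
-- ===== Notes on version B (the rewrite author's own statement) =====
-- stated objective: alternative
-- what changed: Rotation rebuilds each band's rows whole by rotating every block with the transpose-of-reversed-rows (zip(*blk[::-1])) idiom instead of A's per-element index-formula writes into the grid, and the melt neighbour counts are computed as the sum of four whole-grid shifted copies of a 0/1 icy mask instead of A's per-cell 4-direction bounds-checked scan into a cnt grid.
-- outside the precondition, e.g. on rotate_and_melting([[1, 2], [3, 4]], 1, 0): A returns [[0, 2], [3, 4]], B returns [[0], [3, 4]]
import Mathlib
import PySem

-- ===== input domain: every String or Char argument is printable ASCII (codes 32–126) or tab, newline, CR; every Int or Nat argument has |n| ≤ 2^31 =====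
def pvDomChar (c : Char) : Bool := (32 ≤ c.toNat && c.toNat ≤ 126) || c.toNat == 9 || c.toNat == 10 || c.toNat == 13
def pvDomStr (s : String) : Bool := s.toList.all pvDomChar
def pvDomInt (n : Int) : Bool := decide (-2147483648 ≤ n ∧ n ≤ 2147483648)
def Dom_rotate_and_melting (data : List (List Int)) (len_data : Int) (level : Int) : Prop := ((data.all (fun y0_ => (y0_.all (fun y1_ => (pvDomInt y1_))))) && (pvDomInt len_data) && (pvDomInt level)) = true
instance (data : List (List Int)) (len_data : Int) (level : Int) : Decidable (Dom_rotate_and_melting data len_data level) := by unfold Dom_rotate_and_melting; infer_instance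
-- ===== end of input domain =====

-- B rotates each band of blocks with the transpose-of-reversed-rows idiom, rebuilding rows
-- whole, and melts using four whole-grid shifts of an icy mask instead of a per-cell
-- 4-direction bounds-checked scan. Both Pythons mutate `data` in place; the equivalence
-- proved here is about the return value.

-- shared indexing helpers (Python g[i][j] reads / g[i][j] = v writes, nonneg indices under Pre_)
def pvGet (g : List (List Int)) (i j : Int) : Int :=
  PySem.List.pyGetD (PySem.List.pyGetD g i []) j 0

def pvSet (g : List (List Int)) (i j : Int) (v : Int) : List (List Int) :=
  PySem.List.pySetD g i (PySem.List.pySetD (PySem.List.pyGetD g i []) j v)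

-- ===== PORT A =====
def dxL : List Int := [-1, 0, 1, 0]
def dyL : List Int := [0, 1, 0, -1]

-- one (x, y) block of A's rotation loop: temp copy, then per-element writes
def aBlock (term : Int) (d : List (List Int)) (x y : Int) : List (List Int) :=
  let temp := (PySem.List.pyRange x (x + term) 1).map
    (fun i => PySem.List.slice (PySem.List.pyGetD d i []) (some y) (some (y + term)))
  (PySem.List.pyRange 0 term 1).foldl (fun d i =>
    (PySem.List.pyRange 0 term 1).foldl (fun d j =>
      pvSet d (x + j) (y + term - i - 1)
        (PySem.List.pyGetD (PySem.List.pyGetD temp i []) j 0)) d) d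

def aRotate (term len_data : Int) (d : List (List Int)) : List (List Int) :=
  (PySem.List.pyRange 0 len_data term).foldl (fun d x =>
    (PySem.List.pyRange 0 len_data term).foldl (fun d y => aBlock term d x y) d) d

def aCnt (len_data : Int) (d1 : List (List Int)) : List (List Int) :=
  let cnt0 := (PySem.List.pyRange 0 len_data 1).map
    (fun _ => PySem.List.pyRepeat [(0 : Int)] len_data)
  (PySem.List.pyRange 0 len_data 1).foldl (fun c i =>
    (PySem.List.pyRange 0 len_data 1).foldl (fun c j =>
      (PySem.List.pyRange 0 4 1).foldl (fun c k =>
        let nx := i + PySem.List.pyGetD dxL k 0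
        let ny := j + PySem.List.pyGetD dyL k 0
        if 0 ≤ nx ∧ nx < len_data ∧ 0 ≤ ny ∧ ny < len_data ∧ pvGet d1 nx ny ≠ 0 then
          pvSet c i j (pvGet c i j + 1)
        else c) c) c) cnt0

def aMelt (len_data : Int) (cnt d1 : List (List Int)) : List (List Int) :=
  (PySem.List.pyRange 0 len_data 1).foldl (fun d i =>
    (PySem.List.pyRange 0 len_data 1).foldl (fun d j =>
      if pvGet d i j > 0 ∧ pvGet cnt i j < 3 then pvSet d i j (pvGet d i j - 1) else d) d) d1

def rotate_and_melting (data : List (List Int)) (len_data : Int) (level : Int) : List (List Int) :=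
  let term : Int := 2 ^ level.toNat
  let d1 := aRotate term len_data data
  let cnt := aCnt len_data d1
  aMelt len_data cnt d1

-- ===== PORT B =====
-- zip(*rows): Python's zip applied to the unpacked rows — truncates to the shortest row
def pyZipStar (rs : List (List Int)) : List (List Int) :=
  match rs with
  | [] => []
  | r :: rest => (List.range ((r :: rest).foldl (fun m row => min m row.length) r.length)).map
      (fun i => (r :: rest).map (fun row => row.getD i 0))

-- zip of five lists, truncating at the shortest (Python's zip)
def zip5 : List Int → List Int → List Int → List Int → List Int →
    List (Int × Int × Int × Int × Int)
  | a :: as', b :: bs, c :: cs, d :: ds, e :: es => (a, b, c, d, e) :: zip5 as' bs cs ds es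
  | _, _, _, _, _ => []

-- one band of B's rotation: rotate every t-block of the band with zip(*blk[::-1]),
-- then write the band's rows back whole
def bBandStep (len_data t : Int) (d : List (List Int)) (x : Int) : List (List Int) :=
  let band := PySem.List.slice d (some x) (some (x + t))
  let rots := (PySem.List.pyRange 0 len_data t).map (fun y =>
    pyZipStar ((band.map (fun row => PySem.List.slice row (some y) (some (y + t)))).reverse))
  (PySem.List.pyRange 0 t 1).foldl (fun d i =>
    PySem.List.pySetD d (x + i) (rots.flatMap (fun blk => PySem.List.pyGetD blk i []))) d

def bRotate (len_data t : Int) (d : List (List Int)) : List (List Int) :=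
  (PySem.List.pyRange 0 len_data t).foldl (bBandStep len_data t) d

-- melt: neighbour counts as the sum of four whole-grid shifts of the icy mask
def bMelt (len_data : Int) (d1 : List (List Int)) : List (List Int) :=
  let ice := d1.map (fun row => row.map (fun v => if v ≠ 0 then (1 : Int) else 0))
  let zrow := PySem.List.pyRepeat [(0 : Int)] len_data
  let up := PySem.List.slice ice (some 1) none ++ [zrow]
  let down := zrow :: PySem.List.slice ice none (some (-1))
  let left := ice.map (fun r => PySem.List.slice r (some 1) none ++ [(0 : Int)])
  let right := ice.map (fun r => (0 : Int) :: PySem.List.slice r none (some (-1)))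
  (PySem.List.pyRange 0 len_data 1).foldl (fun d i =>
    PySem.List.pySetD d i ((zip5 (PySem.List.pyGetD d i []) (PySem.List.pyGetD up i [])
        (PySem.List.pyGetD down i []) (PySem.List.pyGetD left i [])
        (PySem.List.pyGetD right i [])).map
      (fun q => if q.1 > 0 ∧ q.2.1 + q.2.2.1 + q.2.2.2.1 + q.2.2.2.2 < 3 then q.1 - 1 else q.1))) d1

def rotate_and_melting_alt (data : List (List Int)) (len_data : Int) (level : Int) : List (List Int) :=
  let t : Int := 2 ^ level.toNat
  bMelt len_data (bRotate len_data t data)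

-- ===== PRECONDITION & SPEC =====
-- Pre_ excludes inputs on which A raises (negative level → float step TypeError; a grid that is
-- not len_data × len_data with 2^level dividing len_data → IndexError), and the oversized grids
-- (data strictly larger than len_data × len_data) on which A returns with the untouched trailing
-- rows/columns appended while B naturally returns only the processed square.
def Pre_rotate_and_melting (data : List (List Int)) (len_data : Int) (level : Int) : Prop :=
  0 ≤ level ∧ (len_data ≤ 0 ∨
    (len_data = (data.length : Int) ∧ (∀ r ∈ data, r.length = data.length) ∧
      ((2 : Int) ^ level.toNat ∣ len_data)))

instance (data : List (List Int)) (len_data : Int) (level : Int) : Decidable (Pre_rotate_and_melting data len_data level) := by unfold Pre_rotate_and_melting; infer_instance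

def pvWitness_rotate_and_melting : List (List Int) × Int × Int := ([[1, 2], [3, 4]], 2, 1)

def Spec_rotate_and_melting (data : List (List Int)) (len_data : Int) (level : Int) (out : List (List Int)) : Prop := out = rotate_and_melting_alt data len_data level
instance (data : List (List Int)) (len_data : Int) (level : Int) (out : List (List Int)) : Decidable (Spec_rotate_and_melting data len_data level out) := by unfold Spec_rotate_and_melting; infer_instance

-- ===== CLAIM (what is proved, stated in full; the proofs are below) =====
def Claim_equal_rotate_and_melting : Prop := ∀ (data : List (List Int)) (len_data : Int) (level : Int), Dom_rotate_and_melting data len_data level → Pre_rotate_and_melting data len_data level → Spec_rotate_and_melting data len_data level (rotate_and_melting data len_data level)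

-- ===== LEMMAS AND PROOFS =====

-- 0/1 icy-indicator of a (possibly out-of-range) cell, the common value both melt
-- phases' neighbour counts are reduced to
def bIcy (rot : List (List Int)) (len_data i j : Int) : Int :=
  if 0 ≤ i ∧ i < len_data ∧ 0 ≤ j ∧ j < len_data ∧ pvGet rot i j ≠ 0 then 1 else 0

-- Nat-indexed view of a grid
def gv (g : List (List Int)) (i j : Nat) : Int := (g.getD i []).getD j 0
def set2 (g : List (List Int)) (i j : Nat) (v : Int) : List (List Int) :=
  g.set i ((g.getD i []).set j v)
def Shape (g : List (List Int)) (n : Nat) : Prop :=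
  g.length = n ∧ ∀ r ∈ g, r.length = n

-- value that A's rotation puts at (a, b) (and B's bands produce), T = 2^level
def rotv (data : List (List Int)) (T a b : Nat) : Int :=
  gv data (a - a % T + (T - 1) - b % T) (b - b % T + a % T)

lemma shape_row_len {g : List (List Int)} {n a : Nat} (h : Shape g n) (ha : a < n) :
    (g.getD a []).length = n := by
  rcases h with ⟨hl, hr⟩
  have ha' : a < g.length := by omega
  rw [List.getD_eq_getElem g [] ha']
  exact hr _ (List.getElem_mem ha')

lemma shape_set2 {g : List (List Int)} {n : Nat} (h : Shape g n) (i j : Nat) (v : Int) :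
    Shape (set2 g i j v) n := by
  rcases h with ⟨hl, hr⟩
  by_cases hi : i < g.length
  · constructor
    · simp [set2, hl]
    · intro r hrm
      rcases List.mem_or_eq_of_mem_set hrm with hm | he
      · exact hr _ hm
      · subst he
        simp only [List.length_set]
        rw [List.getD_eq_getElem g [] hi]
        exact hr _ (List.getElem_mem hi)
  · unfold set2
    rw [List.set_eq_of_length_le (by omega)]
    exact ⟨hl, hr⟩

lemma gv_set2_ne {g : List (List Int)} {i j a b : Nat} (h : (a, b) ≠ (i, j)) (v : Int) :
    gv (set2 g i j v) a b = gv g a b := by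
  by_cases ha : a = i
  · subst ha
    have hb : b ≠ j := by intro hb; exact h (by rw [hb])
    by_cases hi : a < g.length
    · unfold gv set2
      simp only [List.getD]
      rw [List.getElem?_set_self (by omega)]
      simp only [Option.getD_some]
      rw [List.getElem?_set_ne (by omega : j ≠ b)]
    · unfold gv set2
      rw [List.set_eq_of_length_le (by omega)]
  · unfold gv set2
    simp only [List.getD]
    rw [List.getElem?_set_ne (by omega : i ≠ a)]

lemma gv_set2_self {g : List (List Int)} {n i j : Nat} (hs : Shape g n)
    (hi : i < n) (hj : j < n) (v : Int) :
    gv (set2 g i j v) i j = v := by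
  have hil : i < g.length := by rcases hs with ⟨hl, _⟩; omega
  have hjl : j < (g.getD i []).length := by rw [shape_row_len hs hi]; omega
  unfold gv set2
  simp only [List.getD]
  rw [List.getElem?_set_self (by omega), Option.getD_some,
    List.getElem?_set_self (by simpa [List.getD] using hjl), Option.getD_some]

-- generic fold over single-cell writes ---------------------------------------------------

lemma foldl_shape {σ : Type} (step : List (List Int) → σ → List (List Int)) (n : Nat)
    (hsh : ∀ g s, Shape g n → Shape (step g s) n) :
    ∀ (L : List σ) (g : List (List Int)), Shape g n → Shape (L.foldl step g) n := by
  intro L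
  induction L with
  | nil => intro g hg; simpa using hg
  | cons s t ih => intro g hg; exact ih _ (hsh g s hg)

lemma foldl_gv_ne {σ : Type} (step : List (List Int) → σ → List (List Int))
    (pos : σ → Nat × Nat) (n : Nat)
    (hsh : ∀ g s, Shape g n → Shape (step g s) n)
    (hne : ∀ g s a b, Shape g n → (a, b) ≠ pos s → gv (step g s) a b = gv g a b) :
    ∀ (L : List σ) (g : List (List Int)) (a b : Nat), Shape g n →
      (∀ s ∈ L, pos s ≠ (a, b)) → gv (L.foldl step g) a b = gv g a b := by
  intro L
  induction L with
  | nil => intro g a b _ _; rfl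
  | cons s t ih =>
    intro g a b hg hL
    have h1 : gv (step g s) a b = gv g a b :=
      hne g s a b hg (fun he => hL s (by simp) he.symm)
    rw [List.foldl_cons, ih _ a b (hsh g s hg) (fun u hu => hL u (by simp [hu])), h1]

lemma foldl_gv_self {σ : Type} (step : List (List Int) → σ → List (List Int))
    (pos : σ → Nat × Nat) (F : σ → Int → Int) (n : Nat)
    (hsh : ∀ g s, Shape g n → Shape (step g s) n)
    (hne : ∀ g s a b, Shape g n → (a, b) ≠ pos s → gv (step g s) a b = gv g a b) :
    ∀ (L : List σ) (g : List (List Int)) (s : σ) (a b : Nat), Shape g n →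
      (∀ g' s', s' ∈ L → Shape g' n →
        gv (step g' s') (pos s').1 (pos s').2 = F s' (gv g' (pos s').1 (pos s').2)) →
      L.Pairwise (fun u t => pos u ≠ pos t) → s ∈ L → pos s = (a, b) →
      gv (L.foldl step g) a b = F s (gv g a b) := by
  intro L
  induction L with
  | nil => intro g s a b _ _ _ hm; cases hm
  | cons u t ih =>
    intro g s a b hg hself hp hm hpos
    rcases List.mem_cons.mp hm with he | hmt
    · subst he
      rw [List.foldl_cons,
        foldl_gv_ne step pos n hsh hne t (step g s) a b (hsh g s hg)
          (fun w hw => fun he => ((List.pairwise_cons.mp hp).1 w hw) (hpos ▸ he.symm))]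
      have := hself g s (by simp) hg
      rw [hpos] at this; exact this
    · have hgu : gv (step g u) a b = gv g a b := by
        refine hne g u a b hg ?_
        intro he
        exact ((List.pairwise_cons.mp hp).1 s hmt) (by rw [hpos, he])
      rw [List.foldl_cons,
        ih _ s a b (hsh g u hg) (fun g' s' hs' => hself g' s' (by simp [hs']))
          (List.pairwise_cons.mp hp).2 hmt hpos, hgu]

lemma foldl_foldl_eq_flatMap {α σ : Type} (step : List (List Int) → σ → List (List Int))
    (f : α → List σ) :
    ∀ (l : List α) (g : List (List Int)),
      l.foldl (fun g a => (f a).foldl step g) g = (l.flatMap f).foldl step g := by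
  intro l
  induction l with
  | nil => intro g; rfl
  | cons a t ih => intro g; rw [List.foldl_cons, List.flatMap_cons, List.foldl_append, ih]

lemma foldl_fun_congr {α β : Type} (f g : β → α → β) (h : ∀ acc a, f acc a = g acc a) :
    ∀ (l : List α) (init : β), l.foldl f init = l.foldl g init := by
  intro l
  induction l with
  | nil => intro init; rfl
  | cons a t ih => intro init; rw [List.foldl_cons, List.foldl_cons, h, ih]

-- the flattened index square
def idxSq (m k : Nat) : List (Nat × Nat) :=
  (List.range m).flatMap (fun i => (List.range k).map (fun j => (i, j)))

lemma mem_idxSq {m k : Nat} {p : Nat × Nat} : p ∈ idxSq m k ↔ p.1 < m ∧ p.2 < k := by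
  rcases p with ⟨a, b⟩
  simp only [idxSq, List.mem_flatMap, List.mem_map, List.mem_range, Prod.mk.injEq]
  constructor
  · rintro ⟨i, hi, j, hj, rfl, rfl⟩
    exact ⟨hi, hj⟩
  · rintro ⟨ha, hb⟩
    exact ⟨a, ha, b, hb, rfl, rfl⟩

lemma nodup_idxSq (m k : Nat) : (idxSq m k).Nodup := by
  apply List.nodup_flatMap.mpr
  constructor
  · intro i _
    exact (List.nodup_range).map (fun x y h => (Prod.mk.injEq .. ▸ h).2)
  · apply List.Pairwise.imp ?_ (List.nodup_range (n := m))
    intro i j hij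
    simp only [List.Disjoint, List.mem_map]
    rintro ⟨x, hx⟩ ⟨u, _, he⟩ ⟨w, _, he2⟩
    obtain ⟨rfl, rfl⟩ := Prod.mk.injEq .. ▸ he
    exact hij (Prod.mk.injEq .. ▸ he2).1.symm


lemma pvGet_natCast (g : List (List Int)) (i j : Nat) :
    pvGet g (i : Int) (j : Int) = gv g i j := by
  simp [pvGet, gv, PySem.List.pyGetD_natCast]

lemma pvSet_natCast (g : List (List Int)) (i j : Nat) (v : Int) :
    pvSet g (i : Int) (j : Int) v = set2 g i j v := by
  simp [pvSet, set2, PySem.List.pySetD_natCast, PySem.List.pyGetD_natCast]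

lemma nested_to_idxSq (step : List (List Int) → Nat × Nat → List (List Int)) (m k : Nat)
    (g : List (List Int)) :
    (List.range m).foldl (fun d i => (List.range k).foldl (fun d j => step d (i, j)) d) g
      = (idxSq m k).foldl step g := by
  unfold idxSq
  rw [← foldl_foldl_eq_flatMap]
  simp [List.foldl_map]

-- characterization of one rotation block of A --------------------------------------------

lemma temp_lookup (T n x y : Nat) (hx : x + T ≤ n) (hy : y + T ≤ n)
    (d : List (List Int)) (hs : Shape d n) (i j : Nat) (hi : i < T) (hj : j < T) :
    PySem.List.pyGetD (PySem.List.pyGetD ((PySem.List.pyRange (x : Int) ((x : Int) + (T : Int)) 1).map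
      (fun i => PySem.List.slice (PySem.List.pyGetD d i []) (some (y : Int)) (some ((y : Int) + (T : Int)))))
      (i : Int) []) (j : Int) 0 = gv d (x + i) (y + j) := by
  have h1 : i < (((x : Int) + (T : Int)) - (x : Int)).toNat := by
    have : ((x : Int) + (T : Int)) - (x : Int) = (T : Int) := by ring
    rw [this]; simpa using hi
  rw [PySem.List.pyGetD_map_pyRange_one _ _ _ i [] h1]
  have h2 : (x : Int) + (i : Int) = ((x + i : Nat) : Int) := by push_cast; ring
  rw [h2, PySem.List.pyGetD_natCast, PySem.List.slice_natCast_add]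
  have hrow : (d.getD (x + i) []).length = n := shape_row_len hs (by omega)
  have h3 : j < (((d.getD (x + i) []).drop y).take T).length := by
    simp only [List.length_take, List.length_drop, hrow]; omega
  rw [PySem.List.pyGetD_natCast, List.getD_eq_getElem _ 0 h3]
  rw [List.getElem_take, List.getElem_drop]
  unfold gv
  rw [List.getD_eq_getElem _ 0 (by omega)]

lemma aBlock_char (T n x y : Nat) (hx : x + T ≤ n) (hy : y + T ≤ n)
    (d : List (List Int)) (hs : Shape d n) :
    Shape (aBlock (T : Int) d (x : Int) (y : Int)) n ∧
    ∀ a b : Nat, gv (aBlock (T : Int) d (x : Int) (y : Int)) a b =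
      if x ≤ a ∧ a < x + T ∧ y ≤ b ∧ b < y + T then
        gv d (x + (y + T - 1 - b)) (y + (a - x)) else gv d a b := by
  have hconv : aBlock (T : Int) d (x : Int) (y : Int) = (idxSq T T).foldl
      (fun d' p => set2 d' (x + p.2) (y + T - 1 - p.1) (gv d (x + p.1) (y + p.2)))
      d := by
    unfold aBlock
    simp only [PySem.List.pyRange_zero_natCast, List.foldl_map]
    refine (nested_to_idxSq (fun d' p => pvSet d' ((x : Int) + (p.2 : Int))
      ((y : Int) + (T : Int) - (p.1 : Int) - 1)
      (PySem.List.pyGetD (PySem.List.pyGetD ((PySem.List.pyRange (x : Int) ((x : Int) + (T : Int)) 1).map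
        (fun i => PySem.List.slice (PySem.List.pyGetD d i []) (some (y : Int)) (some ((y : Int) + (T : Int)))))
        (p.1 : Int) []) (p.2 : Int) 0)) T T d).trans ?_
    apply PySem.List.foldl_congr_mem
    intro acc p hp
    have hm := mem_idxSq.mp hp
    rw [temp_lookup T n x y hx hy d hs p.1 p.2 hm.1 hm.2]
    have h1 : (x : Int) + (p.2 : Int) = ((x + p.2 : Nat) : Int) := by push_cast; ring
    have h2 : (y : Int) + (T : Int) - (p.1 : Int) - 1 = ((y + T - 1 - p.1 : Nat) : Int) := by
      have := hm.1; omega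
    rw [h1, h2, pvSet_natCast]
  rw [hconv]
  set step := fun (d' : List (List Int)) (p : Nat × Nat) =>
    set2 d' (x + p.2) (y + T - 1 - p.1) (gv d (x + p.1) (y + p.2)) with hstep
  have hsh : ∀ g s, Shape g n → Shape (step g s) n := fun g s hg => shape_set2 hg _ _ _
  have hne : ∀ g s a b, Shape g n → (a, b) ≠ (x + s.2, y + T - 1 - s.1) →
      gv (step g s) a b = gv g a b := fun g s a b _ hnab => gv_set2_ne hnab _
  have hpw : (idxSq T T).Pairwise (fun u t => (x + u.2, y + T - 1 - u.1) ≠ (x + t.2, y + T - 1 - t.1)) := by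
    refine List.Pairwise.imp_of_mem ?_ (nodup_idxSq T T)
    intro p q hpm hqm hne' heq
    have hp := mem_idxSq.mp hpm
    have hq := mem_idxSq.mp hqm
    have h1 : x + p.2 = x + q.2 := congrArg Prod.fst heq
    have h2 : y + T - 1 - p.1 = y + T - 1 - q.1 := congrArg Prod.snd heq
    exact hne' (Prod.ext (by omega) (by omega))
  constructor
  · exact foldl_shape step n hsh _ d hs
  · intro a b
    by_cases hin : x ≤ a ∧ a < x + T ∧ y ≤ b ∧ b < y + T
    · rw [if_pos hin]
      have hmem : ((y + T - 1 - b : Nat), (a - x : Nat)) ∈ idxSq T T :=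
        mem_idxSq.mpr ⟨by omega, by omega⟩
      have := foldl_gv_self step (fun s => (x + s.2, y + T - 1 - s.1))
        (fun s _ => gv d (x + s.1) (y + s.2)) n hsh hne (idxSq T T) d
        ((y + T - 1 - b : Nat), (a - x : Nat)) a b hs
        (by
          intro g' s' hs' hg'
          have hm := mem_idxSq.mp hs'
          exact gv_set2_self hg' (by omega) (by omega) _)
        hpw hmem (Prod.ext (by simp; omega) (by simp; omega))
      rw [this]
    · rw [if_neg hin]
      refine foldl_gv_ne step (fun s => (x + s.2, y + T - 1 - s.1)) n hsh hne (idxSq T T) d a b hs ?_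
      intro s hsm heq
      have hm := mem_idxSq.mp hsm
      have h1 : x + s.2 = a := congrArg Prod.fst heq
      have h2 : y + T - 1 - s.1 = b := congrArg Prod.snd heq
      exact hin ⟨by omega, by omega, by omega, by omega⟩

-- rotation phase of A ---------------------------------------------------------------------

lemma divmod_char (T q r x : Nat) (hT : 0 < T) (hr : r < T) (hx : x = T * q + r) :
    x / T = q ∧ x % T = r := by
  subst hx
  constructor
  · rw [Nat.mul_add_div hT, Nat.div_eq_of_lt hr, Nat.add_zero]
  · rw [Nat.mul_add_mod, Nat.mod_eq_of_lt hr]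

lemma blocks_fold (T n m : Nat) (hT : 0 < T) (hnm : n = T * m) (data : List (List Int)) :
    ∀ (L : List (Nat × Nat)) (d : List (List Int)), Shape d n → L.Nodup →
      (∀ p ∈ L, p.1 < m ∧ p.2 < m) →
      (∀ a b : Nat, a < n → b < n → (a / T, b / T) ∈ L → gv d a b = gv data a b) →
      Shape (L.foldl (fun d p => aBlock (T : Int) d ((T * p.1 : Nat) : Int) ((T * p.2 : Nat) : Int)) d) n ∧
      ∀ a b : Nat, a < n → b < n →
        gv (L.foldl (fun d p => aBlock (T : Int) d ((T * p.1 : Nat) : Int) ((T * p.2 : Nat) : Int)) d) a b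
          = if (a / T, b / T) ∈ L then rotv data T a b else gv d a b := by
  intro L
  induction L with
  | nil =>
    intro d hd _ _ _
    exact ⟨hd, fun a b _ _ => by simp⟩
  | cons p t ih =>
    intro d hd hnd hbb hun
    have hpb := hbb p (by simp)
    set x := T * p.1 with hx
    set y := T * p.2 with hy
    have hxb : x + T ≤ n := by
      have h1 : p.1 + 1 ≤ m := hpb.1
      calc x + T = T * (p.1 + 1) := by rw [hx]; ring
      _ ≤ T * m := Nat.mul_le_mul_left T h1
      _ = n := hnm.symm
    have hyb : y + T ≤ n := by
      have h1 : p.2 + 1 ≤ m := hpb.2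
      calc y + T = T * (p.2 + 1) := by rw [hy]; ring
      _ ≤ T * m := Nat.mul_le_mul_left T h1
      _ = n := hnm.symm
    obtain ⟨hd', hgv'⟩ := aBlock_char T n x y hxb hyb d hd
    have hblk : ∀ a b : Nat, a < n → b < n →
        ((x ≤ a ∧ a < x + T ∧ y ≤ b ∧ b < y + T) ↔ (a / T, b / T) = p) := by
      intro a b _ _
      constructor
      · rintro ⟨h1, h2, h3, h4⟩
        have e1 : a / T = p.1 :=
          (divmod_char T p.1 (a - x) a hT (by omega) (by rw [← hx]; omega)).1
        have e2 : b / T = p.2 :=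
          (divmod_char T p.2 (b - y) b hT (by omega) (by rw [← hy]; omega)).1
        exact Prod.ext e1 e2
      · rintro he
        have e1 : a / T = p.1 := congrArg Prod.fst he
        have e2 : b / T = p.2 := congrArg Prod.snd he
        obtain ⟨ra, hra⟩ : ∃ r, a % T = r := ⟨_, rfl⟩
        obtain ⟨rb, hrb⟩ : ∃ r, b % T = r := ⟨_, rfl⟩
        have hma : ra < T := hra ▸ Nat.mod_lt a hT
        have hmb : rb < T := hrb ▸ Nat.mod_lt b hT
        have hda : a = x + ra := by
          have h := (Nat.div_add_mod a T).symm
          rw [e1, ← hx, hra] at h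
          exact h
        have hdb : b = y + rb := by
          have h := (Nat.div_add_mod b T).symm
          rw [e2, ← hy, hrb] at h
          exact h
        exact ⟨by omega, by omega, by omega, by omega⟩
    have hun' : ∀ a b : Nat, a < n → b < n → (a / T, b / T) ∈ t →
        gv (aBlock (T : Int) d (x : Int) (y : Int)) a b = gv data a b := by
      intro a b ha hb hmem
      rw [hgv' a b]
      have hnotp : ¬ (x ≤ a ∧ a < x + T ∧ y ≤ b ∧ b < y + T) := by
        intro hblkin
        have := (hblk a b ha hb).mp hblkin
        rw [this] at hmem
        exact (List.nodup_cons.mp hnd).1 hmem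
      rw [if_neg hnotp]
      exact hun a b ha hb (by simp [hmem])
    obtain ⟨hsh2, hgv2⟩ := ih _ hd' (List.nodup_cons.mp hnd).2
      (fun q hq => hbb q (by simp [hq])) hun'
    refine ⟨hsh2, ?_⟩
    intro a b ha hb
    rw [List.foldl_cons, hgv2 a b ha hb]
    by_cases hmt : (a / T, b / T) ∈ t
    · rw [if_pos hmt, if_pos (by simp [hmt])]
    · rw [if_neg hmt]
      by_cases hmp : (a / T, b / T) = p
      · rw [if_pos (by simp [hmp]), hgv' a b, if_pos ((hblk a b ha hb).mpr hmp)]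
        have e1 : a / T = p.1 := congrArg Prod.fst hmp
        have e2 : b / T = p.2 := congrArg Prod.snd hmp
        obtain ⟨ra, hra⟩ : ∃ r, a % T = r := ⟨_, rfl⟩
        obtain ⟨rb, hrb⟩ : ∃ r, b % T = r := ⟨_, rfl⟩
        have hma : ra < T := hra ▸ Nat.mod_lt a hT
        have hmb : rb < T := hrb ▸ Nat.mod_lt b hT
        have hda : a = x + ra := by
          have h := (Nat.div_add_mod a T).symm
          rw [e1, ← hx, hra] at h
          exact h
        have hdb : b = y + rb := by
          have h := (Nat.div_add_mod b T).symm
          rw [e2, ← hy, hrb] at h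
          exact h
        have hc1 : x + (y + T - 1 - b) = a - a % T + (T - 1) - b % T := by
          rw [hra, hrb]; omega
        have hc2 : y + (a - x) = b - b % T + a % T := by
          rw [hra, hrb]; omega
        unfold rotv
        rw [← hc1, ← hc2]
        apply hun _ _ (by omega) (by omega)
        have f1 : (x + (y + T - 1 - b)) / T = p.1 :=
          (divmod_char T p.1 (y + T - 1 - b) _ hT (by omega) (by rw [← hx])).1
        have f2 : (y + (a - x)) / T = p.2 :=
          (divmod_char T p.2 (a - x) _ hT (by omega) (by rw [← hy])).1
        rw [f1, f2]
        simp
      · rw [if_neg (by simp [hmt, hmp]), hgv' a b,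
          if_neg (fun hblkin => hmp ((hblk a b ha hb).mp hblkin))]

lemma pyRange_step_eq (T n m : Nat) (hT : 0 < T) (hnm : n = T * m) :
    PySem.List.pyRange 0 (n : Int) (T : Int) = (List.range m).map (fun k => ((T * k : Nat) : Int)) := by
  rw [PySem.List.pyRange_of_pos 0 ((n : Nat) : Int) (s := ((T : Nat) : Int)) (by exact_mod_cast hT)]
  have hcnt : (if (0 : Int) < (n : Int) then (((n : Int) - 0 + (T : Int) - 1) / (T : Int)).toNat else 0) = m := by
    by_cases hn : 0 < n
    · rw [if_pos (by exact_mod_cast hn)]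
      have h1 : ((n : Int) - 0 + (T : Int) - 1) = ((T : Int) - 1) + (m : Int) * (T : Int) := by
        have : (n : Int) = (T : Int) * (m : Int) := by exact_mod_cast congrArg Nat.cast hnm
        rw [this]; ring
      rw [h1, Int.add_mul_ediv_right _ _ (by exact_mod_cast hT.ne' : ((T : Nat) : Int) ≠ 0)]
      rw [Int.ediv_eq_zero_of_lt (by omega) (by omega)]
      simp
    · rw [if_neg (by exact_mod_cast hn)]
      have hm0 : m = 0 := by
        rcases Nat.eq_zero_or_pos m with h | h
        · exact h
        · exfalso
          have : 0 < T * m := Nat.mul_pos hT h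
          rw [← hnm] at this
          omega
      simp [hm0]
  rw [hcnt]
  apply List.map_congr_left
  intro k _
  push_cast
  ring

lemma aRotate_char (T n : Nat) (hT : 0 < T) (hdvd : T ∣ n) (data : List (List Int))
    (hs : Shape data n) :
    Shape (aRotate (T : Int) (n : Int) data) n ∧
    ∀ a b : Nat, a < n → b < n →
      gv (aRotate (T : Int) (n : Int) data) a b = rotv data T a b := by
  obtain ⟨m, hnm⟩ := hdvd
  have hconv : aRotate (T : Int) (n : Int) data = (idxSq m m).foldl
      (fun d p => aBlock (T : Int) d ((T * p.1 : Nat) : Int) ((T * p.2 : Nat) : Int)) data := by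
    unfold aRotate
    rw [pyRange_step_eq T n m hT hnm]
    simp only [List.foldl_map]
    exact nested_to_idxSq (fun d p => aBlock (T : Int) d ((T * p.1 : Nat) : Int) ((T * p.2 : Nat) : Int)) m m data
  rw [hconv]
  obtain ⟨hsh, hgv⟩ := blocks_fold T n m hT hnm data (idxSq m m) data hs (nodup_idxSq m m)
    (fun p hp => mem_idxSq.mp hp) (fun a b _ _ _ => rfl)
  refine ⟨hsh, ?_⟩
  intro a b ha hb
  rw [hgv a b ha hb, if_pos]
  apply mem_idxSq.mpr
  have hmul : n = m * T := by rw [hnm, Nat.mul_comm]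
  constructor
  · exact (Nat.div_lt_iff_lt_mul hT).mpr (by omega)
  · exact (Nat.div_lt_iff_lt_mul hT).mpr (by omega)

-- cnt phase of A --------------------------------------------------------------------------

lemma condInc_char (c : List (List Int)) (n i j : Nat) (hi : i < n) (hj : j < n)
    (hs : Shape c n) (P : Prop) [Decidable P] :
    Shape (if P then set2 c i j (gv c i j + 1) else c) n ∧
    ∀ a b : Nat, gv (if P then set2 c i j (gv c i j + 1) else c) a b =
      if (a, b) = (i, j) then gv c i j + (if P then 1 else 0) else gv c a b := by
  constructor
  · split
    · exact shape_set2 hs _ _ _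
    · exact hs
  · intro a b
    by_cases hab : (a, b) = (i, j)
    · rw [if_pos hab]
      obtain ⟨rfl, rfl⟩ := Prod.mk.injEq .. ▸ hab
      split
      · rw [gv_set2_self hs hi hj]
      · omega
    · rw [if_neg hab]
      split
      · exact gv_set2_ne hab _
      · rfl

lemma kfold_aux (n i j : Nat) (cond : Int → Prop) [DecidablePred cond]
    (val : List (List Int) → Int) :
    ∀ (L : List Int) (c : List (List Int)), Shape c n →
      Shape (L.foldl (fun c k => if cond k then set2 c i j (val c) else c) c) n ∧
      ∀ a b : Nat, (a, b) ≠ (i, j) →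
        gv (L.foldl (fun c k => if cond k then set2 c i j (val c) else c) c) a b = gv c a b := by
  intro L
  induction L with
  | nil => intro c hc; exact ⟨hc, fun a b _ => rfl⟩
  | cons k t ih =>
    intro c hc
    have hstep : Shape (if cond k then set2 c i j (val c) else c) n := by
      split
      · exact shape_set2 hc _ _ _
      · exact hc
    refine ⟨(ih _ hstep).1, ?_⟩
    intro a b hab
    rw [List.foldl_cons, (ih _ hstep).2 a b hab]
    split
    · exact gv_set2_ne hab _
    · rfl

lemma kfold_char (len : Int) (d1 c : List (List Int)) (n i j : Nat)
    (hi : i < n) (hj : j < n) (hs : Shape c n) :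
    Shape ((PySem.List.pyRange 0 4 1).foldl (fun c k =>
        let nx := (i : Int) + PySem.List.pyGetD dxL k 0
        let ny := (j : Int) + PySem.List.pyGetD dyL k 0
        if 0 ≤ nx ∧ nx < len ∧ 0 ≤ ny ∧ ny < len ∧ pvGet d1 nx ny ≠ 0 then
          pvSet c (i : Int) (j : Int) (pvGet c (i : Int) (j : Int) + 1)
        else c) c) n ∧
    ∀ a b : Nat, gv ((PySem.List.pyRange 0 4 1).foldl (fun c k =>
        let nx := (i : Int) + PySem.List.pyGetD dxL k 0
        let ny := (j : Int) + PySem.List.pyGetD dyL k 0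
        if 0 ≤ nx ∧ nx < len ∧ 0 ≤ ny ∧ ny < len ∧ pvGet d1 nx ny ≠ 0 then
          pvSet c (i : Int) (j : Int) (pvGet c (i : Int) (j : Int) + 1)
        else c) c) a b =
      if (a, b) = (i, j) then gv c i j +
        (bIcy d1 len ((i : Int) - 1) (j : Int) + bIcy d1 len ((i : Int) + 1) (j : Int)
          + bIcy d1 len (i : Int) ((j : Int) - 1) + bIcy d1 len (i : Int) ((j : Int) + 1))
      else gv c a b := by
  have h4 : PySem.List.pyRange 0 4 1 = [0, 1, 2, 3] := by decide
  rw [h4]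
  simp only [List.foldl_cons, List.foldl_nil,
    show (PySem.List.pyGetD dxL 0 0 : Int) = -1 from by decide,
    show (PySem.List.pyGetD dxL 1 0 : Int) = 0 from by decide,
    show (PySem.List.pyGetD dxL 2 0 : Int) = 1 from by decide,
    show (PySem.List.pyGetD dxL 3 0 : Int) = 0 from by decide,
    show (PySem.List.pyGetD dyL 0 0 : Int) = 0 from by decide,
    show (PySem.List.pyGetD dyL 1 0 : Int) = 1 from by decide,
    show (PySem.List.pyGetD dyL 2 0 : Int) = 0 from by decide,
    show (PySem.List.pyGetD dyL 3 0 : Int) = -1 from by decide,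
    pvGet_natCast, pvSet_natCast]
  have e0 := condInc_char c n i j hi hj hs
      (0 ≤ (i:Int) + -1 ∧ (i:Int) + -1 < len ∧ 0 ≤ (j:Int) + 0 ∧ (j:Int) + 0 < len ∧ pvGet d1 ((i:Int) + -1) ((j:Int) + 0) ≠ 0)
  set c0 := if (0 ≤ (i:Int) + -1 ∧ (i:Int) + -1 < len ∧ 0 ≤ (j:Int) + 0 ∧ (j:Int) + 0 < len ∧ pvGet d1 ((i:Int) + -1) ((j:Int) + 0) ≠ 0) then set2 c i j (gv c i j + 1) else c with hc0
  have e1 := condInc_char c0 n i j hi hj e0.1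
      (0 ≤ (i:Int) + 0 ∧ (i:Int) + 0 < len ∧ 0 ≤ (j:Int) + 1 ∧ (j:Int) + 1 < len ∧ pvGet d1 ((i:Int) + 0) ((j:Int) + 1) ≠ 0)
  set c1 := if (0 ≤ (i:Int) + 0 ∧ (i:Int) + 0 < len ∧ 0 ≤ (j:Int) + 1 ∧ (j:Int) + 1 < len ∧ pvGet d1 ((i:Int) + 0) ((j:Int) + 1) ≠ 0) then set2 c0 i j (gv c0 i j + 1) else c0 with hc1
  have e2 := condInc_char c1 n i j hi hj e1.1
      (0 ≤ (i:Int) + 1 ∧ (i:Int) + 1 < len ∧ 0 ≤ (j:Int) + 0 ∧ (j:Int) + 0 < len ∧ pvGet d1 ((i:Int) + 1) ((j:Int) + 0) ≠ 0)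
  set c2 := if (0 ≤ (i:Int) + 1 ∧ (i:Int) + 1 < len ∧ 0 ≤ (j:Int) + 0 ∧ (j:Int) + 0 < len ∧ pvGet d1 ((i:Int) + 1) ((j:Int) + 0) ≠ 0) then set2 c1 i j (gv c1 i j + 1) else c1 with hc2
  have e3 := condInc_char c2 n i j hi hj e2.1
      (0 ≤ (i:Int) + 0 ∧ (i:Int) + 0 < len ∧ 0 ≤ (j:Int) + -1 ∧ (j:Int) + -1 < len ∧ pvGet d1 ((i:Int) + 0) ((j:Int) + -1) ≠ 0)
  refine ⟨e3.1, ?_⟩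
  intro u w
  rw [e3.2 u w]
  by_cases hab : (u, w) = (i, j)
  · rw [if_pos hab, if_pos hab, e2.2 i j, if_pos rfl, e1.2 i j, if_pos rfl, e0.2 i j, if_pos rfl]
    simp only [bIcy]
    have g1 : (i:Int) + -1 = (i:Int) - 1 := by ring
    have g2 : (j:Int) + -1 = (j:Int) - 1 := by ring
    have g3 : (i:Int) + 0 = (i:Int) := by ring
    have g4 : (j:Int) + 0 = (j:Int) := by ring
    rw [g1, g2, g3, g4]
    ring
  · rw [if_neg hab, if_neg hab, e2.2 u w, if_neg hab, e1.2 u w, if_neg hab, e0.2 u w, if_neg hab]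

lemma gv_zeros (n : Nat) (a b : Nat) :
    gv ((PySem.List.pyRange 0 (n : Int) 1).map (fun _ => PySem.List.pyRepeat [(0 : Int)] (n : Int))) a b = 0 := by
  unfold gv
  rw [PySem.List.pyRange_zero_natCast, List.map_map]
  by_cases ha : a < n
  · rw [List.getD_eq_getElem _ [] (by simpa using ha)]
    simp only [List.getElem_map, PySem.List.pyRepeat_singleton, Int.toNat_natCast,
      List.getD]
    by_cases hb : b < n <;> simp [hb]
  · rw [List.getD_eq_default _ [] (by simpa using Nat.le_of_not_lt ha)]
    rfl

lemma shape_zeros (n : Nat) :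
    Shape ((PySem.List.pyRange 0 (n : Int) 1).map (fun _ => PySem.List.pyRepeat [(0 : Int)] (n : Int))) n := by
  rw [PySem.List.pyRange_zero_natCast, List.map_map]
  constructor
  · simp
  · intro r hr
    rw [List.mem_map] at hr
    obtain ⟨k, _, rfl⟩ := hr
    simp [PySem.List.pyRepeat_singleton]

lemma aCnt_char (n : Nat) (d1 : List (List Int)) :
    ∀ a b : Nat, a < n → b < n →
      gv (aCnt (n : Int) d1) a b =
        bIcy d1 (n : Int) ((a : Int) - 1) (b : Int) + bIcy d1 (n : Int) ((a : Int) + 1) (b : Int)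
        + bIcy d1 (n : Int) (a : Int) ((b : Int) - 1) + bIcy d1 (n : Int) (a : Int) ((b : Int) + 1) := by
  intro a b ha hb
  have hconv : aCnt (n : Int) d1 = (idxSq n n).foldl
      (fun c p => (PySem.List.pyRange 0 4 1).foldl (fun c k =>
        let nx := (p.1 : Int) + PySem.List.pyGetD dxL k 0
        let ny := (p.2 : Int) + PySem.List.pyGetD dyL k 0
        if 0 ≤ nx ∧ nx < (n : Int) ∧ 0 ≤ ny ∧ ny < (n : Int) ∧ pvGet d1 nx ny ≠ 0 then
          pvSet c (p.1 : Int) (p.2 : Int) (pvGet c (p.1 : Int) (p.2 : Int) + 1)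
        else c) c)
      ((PySem.List.pyRange 0 (n : Int) 1).map (fun _ => PySem.List.pyRepeat [(0 : Int)] (n : Int))) := by
    unfold aCnt
    simp only [PySem.List.pyRange_zero_natCast, List.foldl_map, List.map_map]
    exact nested_to_idxSq (fun c p => (PySem.List.pyRange 0 4 1).foldl (fun c k =>
        let nx := (p.1 : Int) + PySem.List.pyGetD dxL k 0
        let ny := (p.2 : Int) + PySem.List.pyGetD dyL k 0
        if 0 ≤ nx ∧ nx < (n : Int) ∧ 0 ≤ ny ∧ ny < (n : Int) ∧ pvGet d1 nx ny ≠ 0 then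
          pvSet c (p.1 : Int) (p.2 : Int) (pvGet c (p.1 : Int) (p.2 : Int) + 1)
        else c) c) n n _
  rw [hconv]
  set step := fun (c : List (List Int)) (p : Nat × Nat) => (PySem.List.pyRange 0 4 1).foldl (fun c k =>
        let nx := (p.1 : Int) + PySem.List.pyGetD dxL k 0
        let ny := (p.2 : Int) + PySem.List.pyGetD dyL k 0
        if 0 ≤ nx ∧ nx < (n : Int) ∧ 0 ≤ ny ∧ ny < (n : Int) ∧ pvGet d1 nx ny ≠ 0 then
          pvSet c (p.1 : Int) (p.2 : Int) (pvGet c (p.1 : Int) (p.2 : Int) + 1)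
        else c) c with hstep
  have haux : ∀ (g : List (List Int)) (s : Nat × Nat), Shape g n →
      Shape (step g s) n ∧ ∀ a' b' : Nat, (a', b') ≠ (s.1, s.2) → gv (step g s) a' b' = gv g a' b' := by
    intro g s hg
    have := kfold_aux n s.1 s.2
      (fun k => 0 ≤ (s.1 : Int) + PySem.List.pyGetD dxL k 0 ∧ (s.1 : Int) + PySem.List.pyGetD dxL k 0 < (n : Int)
        ∧ 0 ≤ (s.2 : Int) + PySem.List.pyGetD dyL k 0 ∧ (s.2 : Int) + PySem.List.pyGetD dyL k 0 < (n : Int)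
        ∧ pvGet d1 ((s.1 : Int) + PySem.List.pyGetD dxL k 0) ((s.2 : Int) + PySem.List.pyGetD dyL k 0) ≠ 0)
      (fun c => gv c s.1 s.2 + 1) (PySem.List.pyRange 0 4 1) g hg
    simp only [hstep, pvGet_natCast, pvSet_natCast]
    exact this
  have key := foldl_gv_self step (fun s => (s.1, s.2))
    (fun s v => v + (bIcy d1 (n : Int) ((s.1 : Int) - 1) (s.2 : Int) + bIcy d1 (n : Int) ((s.1 : Int) + 1) (s.2 : Int)
          + bIcy d1 (n : Int) (s.1 : Int) ((s.2 : Int) - 1) + bIcy d1 (n : Int) (s.1 : Int) ((s.2 : Int) + 1))) n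
    (fun g s hg => (haux g s hg).1)
    (fun g s a' b' hg hne' => (haux g s hg).2 a' b' hne')
    (idxSq n n) _ (a, b) a b (shape_zeros n)
    (by
      intro g' s' hs' hg'
      have hm := mem_idxSq.mp hs'
      have hk := (kfold_char (n : Int) d1 g' n s'.1 s'.2 hm.1 hm.2 hg').2 s'.1 s'.2
      rw [if_pos rfl] at hk
      exact hk)
    (by
      have := nodup_idxSq n n
      exact this.imp (fun h => by simpa using h))
    (mem_idxSq.mpr ⟨ha, hb⟩) rfl
  rw [key, gv_zeros]
  ring

-- melt phase of A -------------------------------------------------------------------------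

lemma aMelt_char (n : Nat) (cnt d1 : List (List Int)) (hs : Shape d1 n) :
    Shape (aMelt (n : Int) cnt d1) n ∧
    ∀ a b : Nat, a < n → b < n →
      gv (aMelt (n : Int) cnt d1) a b =
        if gv d1 a b > 0 ∧ gv cnt a b < 3 then gv d1 a b - 1 else gv d1 a b := by
  have hconv : aMelt (n : Int) cnt d1 = (idxSq n n).foldl
      (fun d p => if gv d p.1 p.2 > 0 ∧ gv cnt p.1 p.2 < 3
        then set2 d p.1 p.2 (gv d p.1 p.2 - 1) else d) d1 := by
    unfold aMelt
    simp only [PySem.List.pyRange_zero_natCast, List.foldl_map, pvGet_natCast, pvSet_natCast]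
    exact nested_to_idxSq (fun d p => if gv d p.1 p.2 > 0 ∧ gv cnt p.1 p.2 < 3
      then set2 d p.1 p.2 (gv d p.1 p.2 - 1) else d) n n d1
  set step := fun (d : List (List Int)) (p : Nat × Nat) =>
    if gv d p.1 p.2 > 0 ∧ gv cnt p.1 p.2 < 3 then set2 d p.1 p.2 (gv d p.1 p.2 - 1) else d
    with hstep
  have hsh : ∀ g s, Shape g n → Shape (step g s) n := by
    intro g s hg
    simp only [hstep]
    split
    · exact shape_set2 hg _ _ _
    · exact hg
  have hne : ∀ g s a b, Shape g n → (a, b) ≠ (s.1, s.2) → gv (step g s) a b = gv g a b := by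
    intro g s a b hg hne
    simp only [hstep]
    split
    · exact gv_set2_ne hne _
    · rfl
  constructor
  · rw [hconv]
    exact foldl_shape step n hsh _ d1 hs
  · intro a b ha hb
    rw [hconv]
    exact foldl_gv_self step (fun s => (s.1, s.2))
      (fun s v => if v > 0 ∧ gv cnt s.1 s.2 < 3 then v - 1 else v) n hsh hne
      (idxSq n n) d1 (a, b) a b hs
      (by
        intro g' s' hs' hg'
        have hm := mem_idxSq.mp hs'
        simp only [hstep]
        split
        · rw [gv_set2_self hg' hm.1 hm.2]
        · rfl)
      (by
        have := nodup_idxSq n n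
        exact this.imp (fun h => by simpa using h))
      (mem_idxSq.mpr ⟨ha, hb⟩) rfl

-- B side: zip helpers ----------------------------------------------------------------------

lemma minfold_const (t : Nat) :
    ∀ (l : List (List Int)), (∀ r ∈ l, r.length = t) →
      l.foldl (fun m row => min m row.length) t = t := by
  intro l
  induction l with
  | nil => intro _; rfl
  | cons r rest ih =>
    intro h
    rw [List.foldl_cons, h r (by simp), Nat.min_self]
    exact ih (fun r' hr' => h r' (by simp [hr']))

lemma pyZipStar_char (rs : List (List Int)) (t : Nat) (ht : 0 < t)
    (hlen : rs.length = t) (hrows : ∀ r ∈ rs, r.length = t) :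
    pyZipStar rs = (List.range t).map (fun i => rs.map (fun row => row.getD i 0)) := by
  cases rs with
  | nil => simp at hlen; omega
  | cons r rest =>
    have h0 : r.length = t := hrows r (by simp)
    have hdef : pyZipStar (r :: rest)
        = (List.range ((r :: rest).foldl (fun m row => min m row.length) r.length)).map
          (fun i => (r :: rest).map (fun row => row.getD i 0)) := rfl
    rw [hdef, h0, minfold_const t (r :: rest) hrows]

lemma zip5_getD (d : Int × Int × Int × Int × Int) :
    ∀ (as' bs cs ds es : List Int) (j : Nat), j < as'.length → j < bs.length →
      j < cs.length → j < ds.length → j < es.length →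
      (zip5 as' bs cs ds es).getD j d = (as'.getD j 0, bs.getD j 0, cs.getD j 0, ds.getD j 0, es.getD j 0) := by
  intro as'
  induction as' with
  | nil => intro bs cs ds es j h; simp at h
  | cons a as' ih =>
    intro bs cs ds es j ha hb hc hd he
    cases bs with
    | nil => simp at hb
    | cons b bs =>
      cases cs with
      | nil => simp at hc
      | cons c cs =>
        cases ds with
        | nil => simp at hd
        | cons d' ds =>
          cases es with
          | nil => simp at he
          | cons e es =>
            cases j with
            | zero => simp [zip5]
            | succ j =>
              simp only [zip5, List.getD_cons_succ]
              exact ih bs cs ds es j (by simpa using ha) (by simpa using hb)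
                (by simpa using hc) (by simpa using hd) (by simpa using he)

lemma zip5_length (n : Nat) :
    ∀ (as' bs cs ds es : List Int), as'.length = n → bs.length = n → cs.length = n →
      ds.length = n → es.length = n → (zip5 as' bs cs ds es).length = n := by
  induction n with
  | zero =>
    intro as' bs cs ds es ha _ _ _ _
    cases as' with
    | nil => rfl
    | cons _ _ => simp at ha
  | succ n ih =>
    intro as' bs cs ds es ha hb hc hd he
    cases as' with
    | nil => simp at ha
    | cons a as' =>
      cases bs with
      | nil => simp at hb
      | cons b bs =>
        cases cs with
        | nil => simp at hc
        | cons c cs =>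
          cases ds with
          | nil => simp at hd
          | cons d' ds =>
            cases es with
            | nil => simp at he
            | cons e es =>
              simp only [zip5, List.length_cons]
              rw [ih as' bs cs ds es (by simpa using ha) (by simpa using hb)
                (by simpa using hc) (by simpa using hd) (by simpa using he)]

-- B side: row-write folds ------------------------------------------------------------------

lemma flatMap_range_fixed (f : Nat → List Int) (t : Nat) :
    ∀ m : Nat, (∀ k, k < m → (f k).length = t) →
      ((List.range m).flatMap f).length = m * t ∧
      ∀ j, j < m * t → ((List.range m).flatMap f).getD j 0 = (f (j / t)).getD (j % t) 0 := by
  intro m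
  induction m with
  | zero =>
    intro _
    exact ⟨by simp, fun j hj => absurd hj (by simp)⟩
  | succ m ih =>
    intro hf
    obtain ⟨ihl, ihg⟩ := ih (fun k hk => hf k (by omega))
    have hsucc : (m + 1) * t = m * t + t := by ring
    rw [List.range_succ, List.flatMap_append, List.flatMap_cons, List.flatMap_nil,
      List.append_nil]
    constructor
    · rw [List.length_append, ihl, hf m (by omega)]; ring
    · intro j hj
      by_cases hjm : j < m * t
      · have : (((List.range m).flatMap f) ++ f m).getD j 0 = ((List.range m).flatMap f).getD j 0 := by
          simp only [List.getD]
          rw [List.getElem?_append_left (by omega)]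
        rw [this, ihg j hjm]
      · have ht : 0 < t := by by_contra h; omega
        have hr : j - m * t < t := by omega
        have hcomm : t * m = m * t := Nat.mul_comm t m
        have hdm := divmod_char t m (j - m * t) j ht hr (by omega)
        have : (((List.range m).flatMap f) ++ f m).getD j 0 = (f m).getD (j - m * t) 0 := by
          simp only [List.getD]
          rw [List.getElem?_append_right (by omega), ihl]
        rw [this, hdm.1, hdm.2]

lemma foldl_setrow_off (f : Nat → List Int) (x : Nat) :
    ∀ (m : Nat) (g : List (List Int)),
      ((List.range m).foldl (fun d k => d.set (x + k) (f k)) g).length = g.length ∧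
      ∀ a : Nat, ((List.range m).foldl (fun d k => d.set (x + k) (f k)) g).getD a []
        = if x ≤ a ∧ a < x + m ∧ a < g.length then f (a - x) else g.getD a [] := by
  intro m
  induction m with
  | zero =>
    intro g
    refine ⟨by simp, fun a => ?_⟩
    rw [if_neg (by omega)]
    simp
  | succ m ih =>
    intro g
    rw [List.range_succ, List.foldl_append, List.foldl_cons, List.foldl_nil]
    obtain ⟨ihl, ihg⟩ := ih g
    constructor
    · rw [List.length_set, ihl]
    · intro a
      by_cases ham : a = x + m
      · subst ham
        by_cases hag : x + m < g.length
        · rw [List.getD_eq_getElem _ [] (by simp only [List.length_set]; omega),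
            List.getElem_set_self (by simp only [List.length_set]; omega)]
          rw [if_pos ⟨by omega, by omega, hag⟩]
          congr 1
          omega
        · rw [List.set_eq_of_length_le (by omega), ihg _, if_neg (by omega), if_neg (by omega)]
      · have hne : ((((List.range m).foldl (fun d k => d.set (x + k) (f k)) g)).set (x + m) (f m)).getD a []
            = (((List.range m).foldl (fun d k => d.set (x + k) (f k)) g)).getD a [] := by
          simp only [List.getD]
          rw [List.getElem?_set_ne (by omega)]
        rw [hne, ihg a]
        by_cases h1 : x ≤ a ∧ a < x + m ∧ a < g.length
        · rw [if_pos h1, if_pos ⟨h1.1, by omega, h1.2.2⟩]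
        · rw [if_neg h1, if_neg (by omega)]

lemma foldl_setrow_self (F : Nat → List Int → List Int) :
    ∀ (m : Nat) (g : List (List Int)),
      ((List.range m).foldl (fun d k => d.set k (F k (d.getD k []))) g).length = g.length ∧
      ∀ a : Nat, ((List.range m).foldl (fun d k => d.set k (F k (d.getD k []))) g).getD a []
        = if a < m ∧ a < g.length then F a (g.getD a []) else g.getD a [] := by
  intro m
  induction m with
  | zero =>
    intro g
    refine ⟨by simp, fun a => ?_⟩
    rw [if_neg (by omega)]
    simp
  | succ m ih =>
    intro g
    rw [List.range_succ, List.foldl_append, List.foldl_cons, List.foldl_nil]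
    obtain ⟨ihl, ihg⟩ := ih g
    have hrowm : (((List.range m).foldl (fun d k => d.set k (F k (d.getD k []))) g)).getD m []
        = g.getD m [] := by
      rw [ihg m, if_neg (by omega)]
    constructor
    · rw [List.length_set, ihl]
    · intro a
      by_cases ham : a = m
      · subst ham
        by_cases hag : a < g.length
        · rw [List.getD_eq_getElem _ [] (by simp only [List.length_set]; omega),
            List.getElem_set_self (by simp only [List.length_set]; omega), hrowm]
          rw [if_pos ⟨by omega, hag⟩]
        · rw [List.set_eq_of_length_le (by omega), ihg _, if_neg (by omega), if_neg (by omega)]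
      · have hne : ((((List.range m).foldl (fun d k => d.set k (F k (d.getD k []))) g)).set m
              (F m ((((List.range m).foldl (fun d k => d.set k (F k (d.getD k []))) g)).getD m []))).getD a []
            = (((List.range m).foldl (fun d k => d.set k (F k (d.getD k []))) g)).getD a [] := by
          simp only [List.getD]
          rw [List.getElem?_set_ne (by omega)]
        rw [hne, ihg a]
        by_cases h1 : a < m ∧ a < g.length
        · rw [if_pos h1, if_pos ⟨by omega, h1.2⟩]
        · rw [if_neg h1, if_neg (by omega)]

-- B side: one band of the rotation ----------------------------------------------------------

lemma bBandStep_char (T n m q : Nat) (hT : 0 < T) (hnm : n = T * m) (hq : q < m)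
    (d : List (List Int)) (hd : Shape d n) :
    Shape (bBandStep (n : Int) (T : Int) d ((T * q : Nat) : Int)) n ∧
    ∀ a b : Nat, a < n → b < n →
      gv (bBandStep (n : Int) (T : Int) d ((T * q : Nat) : Int)) a b =
        if a / T = q then gv d (T * q + (T - 1) - b % T) (T * (b / T) + (a - T * q)) else gv d a b := by
  set x := T * q with hxdef
  have hxb : x + T ≤ n := by
    calc x + T = T * (q + 1) := by rw [hxdef]; ring
    _ ≤ T * m := Nat.mul_le_mul_left T (by omega)
    _ = n := hnm.symm
  -- the band is rows x..x+T-1 of d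
  have hband : PySem.List.slice d (some ((x : Nat) : Int)) (some (((x : Nat) : Int) + (T : Int)))
      = (d.drop x).take T := PySem.List.slice_natCast_add d x T
  set band := (d.drop x).take T with hbanddef
  have hdl : d.length = n := hd.1
  have hbandlen : band.length = T := by
    rw [hbanddef]
    simp only [List.length_take, List.length_drop, hd.1]
    omega
  have hbandrow : ∀ r : Nat, r < T → band.getD r [] = d.getD (x + r) [] := by
    intro r hr
    rw [hbanddef, List.getD_eq_getElem _ [] (by
        simp only [List.length_take, List.length_drop, hd.1]; omega),
      List.getElem_take, List.getElem_drop, List.getD_eq_getElem d [] (by omega : x + r < d.length)]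
  have hbandrows : ∀ r ∈ band, r.length = n := by
    intro r hr
    exact hd.2 r (List.mem_of_mem_drop (List.mem_of_mem_take hr))
  -- the rotated block list for column k
  have hblk : ∀ k : Nat, k < m → ∀ i : Nat, i < T →
      PySem.List.pyGetD (pyZipStar ((band.map (fun row =>
          PySem.List.slice row (some ((T * k : Nat) : Int)) (some (((T * k : Nat) : Int) + (T : Int))))).reverse))
        (i : Int) []
      = (band.map (fun row => (row.drop (T * k)).take T)).reverse.map (fun row => row.getD i 0) := by
    intro k hk i hi
    have hkb : T * k + T ≤ n := by
      calc T * k + T = T * (k + 1) := by ring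
      _ ≤ T * m := Nat.mul_le_mul_left T (by omega)
      _ = n := hnm.symm
    have hsl : (band.map (fun row =>
        PySem.List.slice row (some ((T * k : Nat) : Int)) (some (((T * k : Nat) : Int) + (T : Int)))))
        = band.map (fun row => (row.drop (T * k)).take T) := by
      apply List.map_congr_left
      intro row _
      exact PySem.List.slice_natCast_add row (T * k) T
    rw [hsl, pyZipStar_char _ T hT
      (by simp [hbandlen])
      (by
        intro r hr
        rw [List.mem_reverse, List.mem_map] at hr
        obtain ⟨row, hrow, rfl⟩ := hr
        simp only [List.length_take, List.length_drop, hbandrows row hrow]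
        omega)]
    rw [PySem.List.pyGetD_natCast, List.getD_eq_getElem _ [] (by simpa using hi),
      List.getElem_map, List.getElem_range]
  -- the row written for offset i
  have hrowv : ∀ i : Nat, i < T →
      (((PySem.List.pyRange 0 (n : Int) (T : Int)).map (fun y =>
        pyZipStar ((band.map (fun row => PySem.List.slice row (some y) (some (y + (T : Int))))).reverse))).flatMap
        (fun blk => PySem.List.pyGetD blk (i : Int) [])).length = n ∧
      ∀ j : Nat, j < n →
        (((PySem.List.pyRange 0 (n : Int) (T : Int)).map (fun y =>
          pyZipStar ((band.map (fun row => PySem.List.slice row (some y) (some (y + (T : Int))))).reverse))).flatMap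
          (fun blk => PySem.List.pyGetD blk (i : Int) [])).getD j 0
          = gv d (x + (T - 1) - j % T) (T * (j / T) + i) := by
    intro i hi
    rw [pyRange_step_eq T n m hT hnm, List.map_map, List.flatMap_map]
    simp only [Function.comp_def]
    have hpiece : ∀ k, k < m →
        (PySem.List.pyGetD (pyZipStar ((band.map (fun row =>
            PySem.List.slice row (some ((T * k : Nat) : Int)) (some (((T * k : Nat) : Int) + (T : Int))))).reverse))
          (i : Int) []).length = T := by
      intro k hk
      rw [hblk k hk i hi]
      simp [hbandlen]
    obtain ⟨hL, hG⟩ := flatMap_range_fixed (fun k => PySem.List.pyGetD (pyZipStar ((band.map (fun row =>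
        PySem.List.slice row (some ((T * k : Nat) : Int)) (some (((T * k : Nat) : Int) + (T : Int))))).reverse))
        (i : Int) []) T m hpiece
    have hcomm : m * T = T * m := Nat.mul_comm m T
    constructor
    · rw [hL, hnm]; exact Nat.mul_comm m T
    · intro j hj
      have hjm : j < m * T := by omega
      rw [hG j hjm, hblk (j / T) (by
          have : n = m * T := by rw [hnm, Nat.mul_comm]
          exact (Nat.div_lt_iff_lt_mul hT).mpr (by omega)) i hi]
      have hrm : j % T < T := Nat.mod_lt j hT
      have hlen2 : (band.map (fun row => (row.drop (T * (j / T))).take T)).reverse.length = T := by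
        simp [hbandlen]
      rw [List.getD_eq_getElem _ 0 (by
          simp only [List.length_map, hlen2]
          omega),
        List.getElem_map, List.getElem_reverse, List.getElem_map]
      have hb1 : T - 1 - j % T < band.length := by omega
      have hrowlen : band[T - 1 - j % T].length = n := hbandrows _ (List.getElem_mem _)
      have hbig : T * (j / T) + i < n := by
        have hdiv : j / T < m := by
          have : n = m * T := by rw [hnm, Nat.mul_comm]
          exact (Nat.div_lt_iff_lt_mul hT).mpr (by omega)
        calc T * (j / T) + i < T * (j / T) + T := by omega
        _ = T * (j / T + 1) := by ring
        _ ≤ T * m := Nat.mul_le_mul_left T (by omega)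
        _ = n := hnm.symm
      simp only [List.length_map, hbandlen]
      have hrow' : band[T - 1 - j % T] = d.getD (x + (T - 1 - j % T)) [] := by
        rw [← hbandrow (T - 1 - j % T) (by omega), List.getD_eq_getElem _ [] hb1]
      rw [hrow']
      have hrlen : (d.getD (x + (T - 1 - j % T)) []).length = n := shape_row_len hd (by omega)
      rw [List.getD_eq_getElem _ 0 (by
          simp only [List.length_take, List.length_drop, hrlen]
          omega),
        List.getElem_take, List.getElem_drop]
      unfold gv
      rw [List.getD_eq_getElem _ 0 (by
        rw [shape_row_len hd (by omega)]
        omega)]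
      congr 2
      omega
  -- assemble the band step
  unfold bBandStep
  simp only [hband]
  rw [show PySem.List.pyRange 0 (T : Int) 1 = (List.range T).map (fun i : Nat => (i : Int)) from
      PySem.List.pyRange_zero_natCast T, List.foldl_map]
  have hsetconv : ∀ (g : List (List Int)),
      (List.range T).foldl (fun d' i =>
        PySem.List.pySetD d' (((x : Nat) : Int) + (i : Nat))
          (((PySem.List.pyRange 0 (n : Int) (T : Int)).map (fun y =>
            pyZipStar ((band.map (fun row => PySem.List.slice row (some y) (some (y + (T : Int))))).reverse))).flatMap
            (fun blk => PySem.List.pyGetD blk (i : Nat) []))) g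
      = (List.range T).foldl (fun d' i => d'.set (x + i)
          (((PySem.List.pyRange 0 (n : Int) (T : Int)).map (fun y =>
            pyZipStar ((band.map (fun row => PySem.List.slice row (some y) (some (y + (T : Int))))).reverse))).flatMap
            (fun blk => PySem.List.pyGetD blk (i : Nat) []))) g := by
    intro g
    apply foldl_fun_congr
    intro d' i
    rw [show ((x : Nat) : Int) + ((i : Nat) : Int) = ((x + i : Nat) : Int) from by push_cast; ring,
      PySem.List.pySetD_natCast]
  rw [hsetconv]
  obtain ⟨hfl, hfg⟩ := foldl_setrow_off (fun i =>
    (((PySem.List.pyRange 0 (n : Int) (T : Int)).map (fun y =>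
      pyZipStar ((band.map (fun row => PySem.List.slice row (some y) (some (y + (T : Int))))).reverse))).flatMap
      (fun blk => PySem.List.pyGetD blk ((i : Nat) : Int) []))) x T d
  constructor
  · constructor
    · rw [hfl, hd.1]
    · intro r hr
      rw [List.mem_iff_getElem] at hr
      obtain ⟨idx, hidx, rfl⟩ := hr
      have hidxn : idx < n := by rw [hfl, hd.1] at hidx; exact hidx
      rw [← List.getD_eq_getElem _ [] hidx, hfg idx]
      by_cases hcase : x ≤ idx ∧ idx < x + T ∧ idx < d.length
      · rw [if_pos hcase]
        exact (hrowv (idx - x) (by omega)).1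
      · rw [if_neg hcase]
        exact shape_row_len hd hidxn
  · intro a b ha hb
    unfold gv
    rw [hfg a]
    by_cases hcase : a / T = q
    · have hxa : x ≤ a ∧ a < x + T := by
        have h1 := Nat.div_add_mod a T
        have h2 : a % T < T := Nat.mod_lt a hT
        rw [hcase] at h1
        exact ⟨by omega, by omega⟩
      rw [if_pos ⟨hxa.1, hxa.2, by omega⟩, if_pos hcase]
      have := (hrowv (a - x) (by omega)).2 b hb
      unfold gv at this
      rw [this]
    · have : ¬ (x ≤ a ∧ a < x + T ∧ a < d.length) := by
        intro ⟨h1, h2, _⟩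
        exact hcase (divmod_char T q (a - x) a hT (by omega) (by omega)).1
      rw [if_neg this, if_neg hcase]

-- B side: whole rotation --------------------------------------------------------------------

lemma bands_fold (T n m : Nat) (hT : 0 < T) (hnm : n = T * m) (data : List (List Int)) :
    ∀ (L : List Nat) (d : List (List Int)), Shape d n → L.Nodup → (∀ q ∈ L, q < m) →
      (∀ a b : Nat, a < n → b < n → a / T ∈ L → gv d a b = gv data a b) →
      Shape (L.foldl (fun d q => bBandStep (n : Int) (T : Int) d ((T * q : Nat) : Int)) d) n ∧
      ∀ a b : Nat, a < n → b < n →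
        gv (L.foldl (fun d q => bBandStep (n : Int) (T : Int) d ((T * q : Nat) : Int)) d) a b
          = if a / T ∈ L then rotv data T a b else gv d a b := by
  intro L
  induction L with
  | nil =>
    intro d hd _ _ _
    exact ⟨hd, fun a b _ _ => by simp⟩
  | cons q t ih =>
    intro d hd hnd hbb hun
    have hq : q < m := hbb q (by simp)
    obtain ⟨hd', hgv'⟩ := bBandStep_char T n m q hT hnm hq d hd
    have hun' : ∀ a b : Nat, a < n → b < n → a / T ∈ t →
        gv (bBandStep (n : Int) (T : Int) d ((T * q : Nat) : Int)) a b = gv data a b := by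
      intro a b ha hb hmem
      rw [hgv' a b ha hb, if_neg (by
        intro he
        rw [he] at hmem
        exact (List.nodup_cons.mp hnd).1 hmem)]
      exact hun a b ha hb (by simp [hmem])
    obtain ⟨hsh2, hgv2⟩ := ih _ hd' (List.nodup_cons.mp hnd).2
      (fun q' hq' => hbb q' (by simp [hq'])) hun'
    refine ⟨hsh2, ?_⟩
    intro a b ha hb
    rw [List.foldl_cons, hgv2 a b ha hb]
    by_cases hmt : a / T ∈ t
    · rw [if_pos hmt, if_pos (by simp [hmt])]
    · rw [if_neg hmt]
      by_cases hmq : a / T = q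
      · rw [if_pos (by simp [hmq]), hgv' a b ha hb, if_pos hmq]
        obtain ⟨ra, hra⟩ : ∃ r, a % T = r := ⟨_, rfl⟩
        obtain ⟨rb, hrb⟩ : ∃ r, b % T = r := ⟨_, rfl⟩
        have hma : ra < T := hra ▸ Nat.mod_lt a hT
        have hmb : rb < T := hrb ▸ Nat.mod_lt b hT
        have hda : a = T * q + ra := by
          have h := (Nat.div_add_mod a T).symm
          rw [hmq, hra] at h
          exact h
        have hbd : b = T * (b / T) + rb := by
          have h := (Nat.div_add_mod b T).symm
          rw [hrb] at h
          exact h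
        have hdivb : b / T < m := by
          have : n = m * T := by rw [hnm, Nat.mul_comm]
          exact (Nat.div_lt_iff_lt_mul hT).mpr (by omega)
        have hr1 : T * q + (T - 1) - b % T < n := by
          have : T * q + T ≤ n := by
            calc T * q + T = T * (q + 1) := by ring
            _ ≤ T * m := Nat.mul_le_mul_left T (by omega)
            _ = n := hnm.symm
          omega
        have hc1 : T * (b / T) + (a - T * q) < n := by
          have : T * (b / T) + T ≤ n := by
            calc T * (b / T) + T = T * (b / T + 1) := by ring
            _ ≤ T * m := Nat.mul_le_mul_left T (by omega)
            _ = n := hnm.symm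
          omega
        rw [hun _ _ hr1 hc1 (by
          have : (T * q + (T - 1) - b % T) / T = q :=
            (divmod_char T q (T - 1 - rb) _ hT (by omega) (by rw [hrb]; omega)).1
          rw [this]
          simp)]
        unfold rotv
        have e1 : T * q + (T - 1) - b % T = a - a % T + (T - 1) - b % T := by omega
        have e2 : T * (b / T) + (a - T * q) = b - b % T + a % T := by omega
        rw [e1, e2]
      · rw [if_neg (by simp [hmt, hmq]), hgv' a b ha hb, if_neg hmq]

lemma bRotate_char (T n : Nat) (hT : 0 < T) (hdvd : T ∣ n) (data : List (List Int))
    (hs : Shape data n) :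
    Shape (bRotate (n : Int) (T : Int) data) n ∧
    ∀ a b : Nat, a < n → b < n →
      gv (bRotate (n : Int) (T : Int) data) a b = rotv data T a b := by
  obtain ⟨m, hnm⟩ := hdvd
  have hconv : bRotate (n : Int) (T : Int) data = (List.range m).foldl
      (fun d q => bBandStep (n : Int) (T : Int) d ((T * q : Nat) : Int)) data := by
    unfold bRotate
    rw [pyRange_step_eq T n m hT hnm, List.foldl_map]
  rw [hconv]
  obtain ⟨hsh, hgv⟩ := bands_fold T n m hT hnm data (List.range m) data hs
    List.nodup_range (fun q hq => List.mem_range.mp hq) (fun a b _ _ _ => rfl)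
  refine ⟨hsh, ?_⟩
  intro a b ha hb
  rw [hgv a b ha hb, if_pos]
  apply List.mem_range.mpr
  have : n = m * T := by rw [hnm, Nat.mul_comm]
  exact (Nat.div_lt_iff_lt_mul hT).mpr (by omega)

-- B side: melt with shifted masks -----------------------------------------------------------

lemma getD_shiftL {α : Type} (l : List α) (z d : α) (b n : Nat) (hl : l.length = n)
    (hb : b < n) :
    (l.tail ++ [z]).getD b d = if b + 1 < n then l.getD (b + 1) d else z := by
  by_cases h : b + 1 < n
  · rw [if_pos h]
    simp only [List.getD]
    rw [List.getElem?_append_left (by rw [List.length_tail, hl]; omega), List.getElem?_tail]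
  · rw [if_neg h]
    simp only [List.getD]
    rw [List.getElem?_append_right (by rw [List.length_tail, hl]; omega)]
    rw [show b - l.tail.length = 0 from by rw [List.length_tail, hl]; omega]
    rfl

lemma getD_shiftR {α : Type} (l : List α) (z d : α) (b n : Nat) (hl : l.length = n)
    (hb : b < n) :
    (z :: l.dropLast).getD b d = if b = 0 then z else l.getD (b - 1) d := by
  cases b with
  | zero => rw [if_pos rfl]; rfl
  | succ b' =>
    rw [if_neg (by omega), List.getD_cons_succ]
    simp only [List.getD]
    rw [List.getElem?_eq_getElem (by rw [List.length_dropLast, hl]; omega),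
      List.getElem_dropLast, List.getElem?_eq_getElem (by rw [hl]; omega)]
    simp

lemma bMelt_char (n : Nat) (d1 : List (List Int)) (hs : Shape d1 n) :
    Shape (bMelt (n : Int) d1) n ∧
    ∀ a b : Nat, a < n → b < n →
      gv (bMelt (n : Int) d1) a b =
        if gv d1 a b > 0 ∧ bIcy d1 (n : Int) ((a : Int) + 1) (b : Int) + bIcy d1 (n : Int) ((a : Int) - 1) (b : Int)
            + bIcy d1 (n : Int) (a : Int) ((b : Int) + 1) + bIcy d1 (n : Int) (a : Int) ((b : Int) - 1) < 3
        then gv d1 a b - 1 else gv d1 a b := by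
  unfold bMelt
  set ice := d1.map (fun row => row.map (fun v => if v ≠ 0 then (1 : Int) else 0)) with hice
  set zrow := PySem.List.pyRepeat [(0 : Int)] (n : Int) with hzrow
  set up := PySem.List.slice ice (some 1) none ++ [zrow] with hup
  set down := zrow :: PySem.List.slice ice none (some (-1)) with hdown
  set left := ice.map (fun r => PySem.List.slice r (some 1) none ++ [(0 : Int)]) with hleft
  set right := ice.map (fun r => (0 : Int) :: PySem.List.slice r none (some (-1))) with hright
  have hzrow' : zrow = List.replicate n (0 : Int) := by
    rw [hzrow, PySem.List.pyRepeat_singleton, Int.toNat_natCast]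
  have hicelen : ice.length = n := by rw [hice, List.length_map, hs.1]
  have hicerow : ∀ i : Nat, i < n → ice.getD i [] = (d1.getD i []).map (fun v => if v ≠ 0 then (1 : Int) else 0) := by
    intro i hi
    rw [hice, List.getD_eq_getElem _ [] (by rw [List.length_map, hs.1]; exact hi),
      List.getElem_map, List.getD_eq_getElem _ [] (by rw [hs.1]; exact hi)]
  have hicerowlen : ∀ i : Nat, i < n → (ice.getD i []).length = n := by
    intro i hi
    rw [hicerow i hi, List.length_map, shape_row_len hs hi]
  have hiceval : ∀ i j : Nat, i < n → j < n →
      (ice.getD i []).getD j 0 = (if gv d1 i j ≠ 0 then (1 : Int) else 0) := by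
    intro i j hi hj
    rw [hicerow i hi, List.getD_eq_getElem _ 0 (by rw [List.length_map, shape_row_len hs hi]; exact hj),
      List.getElem_map]
    unfold gv
    rw [List.getD_eq_getElem _ 0 (by rw [shape_row_len hs hi]; exact hj)]
  have hmask : ∀ i j : Nat, i < n → j < n →
      (ice.getD i []).getD j 0 = bIcy d1 (n : Int) (i : Int) (j : Int) := by
    intro i j hi hj
    rw [hiceval i j hi hj]
    unfold bIcy
    rw [pvGet_natCast]
    by_cases h : gv d1 i j ≠ 0
    · rw [if_pos h, if_pos ⟨by omega, by exact_mod_cast hi, by omega, by exact_mod_cast hj, h⟩]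
    · rw [if_neg h, if_neg (by tauto)]
  -- row lookups of the four shifts
  have hzlen : zrow.length = n := by rw [hzrow']; simp
  have hzval : ∀ b : Nat, b < n → zrow.getD b 0 = 0 := by
    intro b hb
    rw [hzrow', List.getD_eq_getElem _ 0 (by simp; omega), List.getElem_replicate]
  have hupRow : ∀ a : Nat, a < n → up.getD a [] = if a + 1 < n then ice.getD (a + 1) [] else zrow := by
    intro a ha
    rw [hup, PySem.List.slice_from_one]
    exact getD_shiftL ice zrow [] a n hicelen ha
  have hdownRow : ∀ a : Nat, a < n → down.getD a [] = if a = 0 then zrow else ice.getD (a - 1) [] := by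
    intro a ha
    rw [hdown, PySem.List.slice_to_neg_one]
    exact getD_shiftR ice zrow [] a n hicelen ha
  have hleftRow : ∀ a : Nat, a < n → left.getD a [] = (ice.getD a []).tail ++ [(0 : Int)] := by
    intro a ha
    rw [hleft, List.getD_eq_getElem _ [] (by rw [List.length_map, hicelen]; exact ha),
      List.getElem_map, PySem.List.slice_from_one,
      List.getD_eq_getElem ice [] (by rw [hicelen]; exact ha)]
  have hrightRow : ∀ a : Nat, a < n → right.getD a [] = (0 : Int) :: (ice.getD a []).dropLast := by
    intro a ha
    rw [hright, List.getD_eq_getElem _ [] (by rw [List.length_map, hicelen]; exact ha),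
      List.getElem_map, PySem.List.slice_to_neg_one,
      List.getD_eq_getElem ice [] (by rw [hicelen]; exact ha)]
  have hupD : ∀ a b : Nat, a < n → b < n →
      (up.getD a []).getD b 0 = bIcy d1 (n : Int) ((a : Int) + 1) (b : Int) := by
    intro a b ha hb
    rw [hupRow a ha]
    by_cases h : a + 1 < n
    · rw [if_pos h, show ((a : Int) + 1) = ((a + 1 : Nat) : Int) from by push_cast; ring]
      exact hmask (a + 1) b h hb
    · rw [if_neg h, hzval b hb]
      unfold bIcy
      rw [if_neg (by rintro ⟨-, h2, -⟩; omega)]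
  have hdownD : ∀ a b : Nat, a < n → b < n →
      (down.getD a []).getD b 0 = bIcy d1 (n : Int) ((a : Int) - 1) (b : Int) := by
    intro a b ha hb
    rw [hdownRow a ha]
    by_cases h : a = 0
    · rw [if_pos h, hzval b hb]
      unfold bIcy
      rw [if_neg (by rintro ⟨h1, -⟩; omega)]
    · rw [if_neg h, show ((a : Int) - 1) = ((a - 1 : Nat) : Int) from by omega]
      exact hmask (a - 1) b (by omega) hb
  have hleftD : ∀ a b : Nat, a < n → b < n →
      (left.getD a []).getD b 0 = bIcy d1 (n : Int) (a : Int) ((b : Int) + 1) := by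
    intro a b ha hb
    rw [hleftRow a ha, getD_shiftL (ice.getD a []) 0 0 b n (hicerowlen a ha) hb]
    by_cases h : b + 1 < n
    · rw [if_pos h, show ((b : Int) + 1) = ((b + 1 : Nat) : Int) from by push_cast; ring]
      exact hmask a (b + 1) ha h
    · rw [if_neg h]
      unfold bIcy
      rw [if_neg (by rintro ⟨-, -, -, h4, -⟩; omega)]
  have hrightD : ∀ a b : Nat, a < n → b < n →
      (right.getD a []).getD b 0 = bIcy d1 (n : Int) (a : Int) ((b : Int) - 1) := by
    intro a b ha hb
    rw [hrightRow a ha, getD_shiftR (ice.getD a []) 0 0 b n (hicerowlen a ha) hb]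
    by_cases h : b = 0
    · rw [if_pos h]
      unfold bIcy
      rw [if_neg (by rintro ⟨-, -, h3, -⟩; omega)]
    · rw [if_neg h, show ((b : Int) - 1) = ((b - 1 : Nat) : Int) from by omega]
      exact hmask a (b - 1) ha (by omega)
  -- row lengths of the shifts
  have huplen : ∀ a : Nat, a < n → (up.getD a []).length = n := by
    intro a ha
    rw [hupRow a ha]
    by_cases h : a + 1 < n
    · rw [if_pos h]; exact hicerowlen (a + 1) h
    · rw [if_neg h]; exact hzlen
  have hdownlen : ∀ a : Nat, a < n → (down.getD a []).length = n := by
    intro a ha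
    rw [hdownRow a ha]
    by_cases h : a = 0
    · rw [if_pos h]; exact hzlen
    · rw [if_neg h]; exact hicerowlen (a - 1) (by omega)
  have hleftlen : ∀ a : Nat, a < n → (left.getD a []).length = n := by
    intro a ha
    rw [hleftRow a ha]
    simp only [List.length_append, List.length_tail, hicerowlen a ha, List.length_cons,
      List.length_nil]
    omega
  have hrightlen : ∀ a : Nat, a < n → (right.getD a []).length = n := by
    intro a ha
    rw [hrightRow a ha]
    simp only [List.length_cons, List.length_dropLast, hicerowlen a ha]
    omega
  -- convert the fold to row updates
  rw [show PySem.List.pyRange 0 (n : Int) 1 = (List.range n).map (fun i : Nat => (i : Int)) from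
      PySem.List.pyRange_zero_natCast n, List.foldl_map]
  have hsetconv : ∀ (g : List (List Int)),
      (List.range n).foldl (fun d i =>
        PySem.List.pySetD d ((i : Nat) : Int) ((zip5 (PySem.List.pyGetD d ((i : Nat) : Int) [])
            (PySem.List.pyGetD up ((i : Nat) : Int) []) (PySem.List.pyGetD down ((i : Nat) : Int) [])
            (PySem.List.pyGetD left ((i : Nat) : Int) []) (PySem.List.pyGetD right ((i : Nat) : Int) [])).map
          (fun q => if q.1 > 0 ∧ q.2.1 + q.2.2.1 + q.2.2.2.1 + q.2.2.2.2 < 3 then q.1 - 1 else q.1))) g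
      = (List.range n).foldl (fun d i => d.set i ((zip5 (d.getD i [])
            (up.getD i []) (down.getD i []) (left.getD i []) (right.getD i [])).map
          (fun q => if q.1 > 0 ∧ q.2.1 + q.2.2.1 + q.2.2.2.1 + q.2.2.2.2 < 3 then q.1 - 1 else q.1))) g := by
    intro g
    apply foldl_fun_congr
    intro d i
    rw [PySem.List.pySetD_natCast]
    simp only [PySem.List.pyGetD_natCast]
  rw [hsetconv]
  set F := fun (i : Nat) (row : List Int) => ((zip5 row
        (up.getD i []) (down.getD i []) (left.getD i []) (right.getD i [])).map
      (fun q => if q.1 > 0 ∧ q.2.1 + q.2.2.1 + q.2.2.2.1 + q.2.2.2.2 < 3 then q.1 - 1 else q.1)) with hF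
  obtain ⟨hfl, hfg⟩ := foldl_setrow_self F n d1
  have hFlen : ∀ a : Nat, a < n → (F a (d1.getD a [])).length = n := by
    intro a ha
    rw [hF]
    simp only [List.length_map]
    exact zip5_length n _ _ _ _ _ (shape_row_len hs ha) (huplen a ha) (hdownlen a ha)
      (hleftlen a ha) (hrightlen a ha)
  constructor
  · constructor
    · rw [hfl, hs.1]
    · intro r hr
      rw [List.mem_iff_getElem] at hr
      obtain ⟨idx, hidx, rfl⟩ := hr
      have hidxn : idx < n := by rw [hfl, hs.1] at hidx; exact hidx
      rw [← List.getD_eq_getElem _ [] hidx, hfg idx, if_pos ⟨hidxn, by rw [hs.1]; exact hidxn⟩]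
      exact hFlen idx hidxn
  · intro a b ha hb
    unfold gv
    rw [hfg a, if_pos ⟨ha, by rw [hs.1]; exact ha⟩, hF]
    have hz := zip5_getD (0, 0, 0, 0, 0) (d1.getD a []) (up.getD a []) (down.getD a [])
      (left.getD a []) (right.getD a []) b (by rw [shape_row_len hs ha]; exact hb)
      (by rw [huplen a ha]; exact hb) (by rw [hdownlen a ha]; exact hb)
      (by rw [hleftlen a ha]; exact hb) (by rw [hrightlen a ha]; exact hb)
    have hblen : b < (zip5 (d1.getD a []) (up.getD a []) (down.getD a [])
        (left.getD a []) (right.getD a [])).length := by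
      rw [zip5_length n _ _ _ _ _ (shape_row_len hs ha) (huplen a ha) (hdownlen a ha)
        (hleftlen a ha) (hrightlen a ha)]
      exact hb
    rw [List.getD_eq_getElem _ 0 (by simpa using hblen), List.getElem_map,
      ← List.getD_eq_getElem _ (0, 0, 0, 0, 0) hblen, hz]
    rw [hupD a b ha hb, hdownD a b ha hb, hleftD a b ha hb, hrightD a b ha hb]

-- comparing the two results ------------------------------------------------------------------

lemma grids_ext (n : Nat) (g1 g2 : List (List Int)) (h1 : Shape g1 n) (h2 : Shape g2 n)
    (h : ∀ a b : Nat, a < n → b < n → gv g1 a b = gv g2 a b) : g1 = g2 := by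
  apply List.ext_getElem (by rw [h1.1, h2.1])
  intro i hi1 hi2
  have hr1 : (g1[i]).length = n := h1.2 _ (List.getElem_mem hi1)
  have hr2 : (g2[i]).length = n := h2.2 _ (List.getElem_mem hi2)
  apply List.ext_getElem (by rw [hr1, hr2])
  intro j hj1 hj2
  have hin : i < n := by rw [← h1.1]; exact hi1
  have hjn : j < n := by rw [← hr1]; exact hj1
  have := h i j hin hjn
  unfold gv at this
  rw [List.getD_eq_getElem g1 [] hi1, List.getD_eq_getElem g2 [] hi2,
    List.getD_eq_getElem _ 0 hj1, List.getD_eq_getElem _ 0 hj2] at this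
  exact this

lemma bIcy_congr (g1 g2 : List (List Int)) (n : Nat)
    (h : ∀ a b : Nat, a < n → b < n → gv g1 a b = gv g2 a b) (x y : Int) :
    bIcy g1 (n : Int) x y = bIcy g2 (n : Int) x y := by
  unfold bIcy
  by_cases hb : 0 ≤ x ∧ x < (n : Int) ∧ 0 ≤ y ∧ y < (n : Int)
  · obtain ⟨h0x, hxn, h0y, hyn⟩ := hb
    have hpv : pvGet g1 x y = pvGet g2 x y := by
      unfold pvGet
      rw [PySem.List.pyGetD_of_nonneg _ _ h0x, PySem.List.pyGetD_of_nonneg _ _ h0y,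
        PySem.List.pyGetD_of_nonneg _ _ h0x, PySem.List.pyGetD_of_nonneg _ _ h0y]
      exact h x.toNat y.toNat (by omega) (by omega)
    rw [hpv]
  · rw [if_neg (by tauto), if_neg (by tauto)]

-- the degenerate case len_data ≤ 0 ------------------------------------------------------

lemma pyRange_nonpos (len s : Int) (hs : 0 < s) (hlen : len ≤ 0) :
    PySem.List.pyRange 0 len s = [] := by
  rw [PySem.List.pyRange_of_pos 0 len hs, if_neg (by omega)]
  rfl

-- ===== VERDICT (by name: the statement is the Claim_ definition above) =====
theorem rotate_and_melting_spec : Claim_equal_rotate_and_melting := by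
  intro data len level hdom hpre
  unfold Spec_rotate_and_melting
  obtain ⟨hlev, hcase⟩ := hpre
  set T : Nat := 2 ^ level.toNat with hTdef
  have hT : 0 < T := Nat.two_pow_pos _
  have hterm : (2 : Int) ^ level.toNat = ((T : Nat) : Int) := by rw [hTdef]; push_cast; ring
  rcases hcase with hneg | ⟨hlen, hrows, hdvd⟩
  · have hr1 : PySem.List.pyRange 0 len ((2 : Int) ^ level.toNat) = [] := by
      rw [hterm]
      exact pyRange_nonpos len _ (by exact_mod_cast hT) hneg
    have hr2 : PySem.List.pyRange 0 len 1 = [] := PySem.List.pyRange_one_eq_nil (by omega)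
    simp only [rotate_and_melting, rotate_and_melting_alt, aRotate, aMelt, bRotate, bMelt,
      hr1, hr2, List.foldl_nil]
  · set n := data.length with hndef
    have hsd : Shape data n := ⟨rfl, fun r hr => hrows r hr⟩
    have hdvdN : T ∣ n := by
      rw [hterm, hlen] at hdvd
      exact_mod_cast hdvd
    rw [hlen]
    simp only [rotate_and_melting, rotate_and_melting_alt]
    rw [hterm]
    obtain ⟨hshA, hgvA⟩ := aRotate_char T n hT hdvdN data hsd
    obtain ⟨hshB, hgvB⟩ := bRotate_char T n hT hdvdN data hsd
    obtain ⟨hshM, hgvM⟩ := aMelt_char n (aCnt (n : Int) (aRotate (T : Int) (n : Int) data))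
      (aRotate (T : Int) (n : Int) data) hshA
    have hcnt := aCnt_char n (aRotate (T : Int) (n : Int) data)
    obtain ⟨hshBM, hgvBM⟩ := bMelt_char n (bRotate (n : Int) (T : Int) data) hshB
    have hAB : ∀ a b : Nat, a < n → b < n →
        gv (aRotate (T : Int) (n : Int) data) a b = gv (bRotate (n : Int) (T : Int) data) a b := by
      intro a b ha hb
      rw [hgvA a b ha hb, hgvB a b ha hb]
    apply grids_ext n _ _ hshM hshBM
    intro a b ha hb
    rw [hgvM a b ha hb, hgvBM a b ha hb]
    have hIcy := bIcy_congr _ _ n hAB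
    rw [hcnt a b ha hb, hAB a b ha hb,
      hIcy ((a : Int) - 1) (b : Int), hIcy ((a : Int) + 1) (b : Int),
      hIcy (a : Int) ((b : Int) - 1), hIcy (a : Int) ((b : Int) + 1)]
    have hsum : bIcy (bRotate (n : Int) (T : Int) data) (n : Int) ((a : Int) - 1) (b : Int)
        + bIcy (bRotate (n : Int) (T : Int) data) (n : Int) ((a : Int) + 1) (b : Int)
        + bIcy (bRotate (n : Int) (T : Int) data) (n : Int) (a : Int) ((b : Int) - 1)
        + bIcy (bRotate (n : Int) (T : Int) data) (n : Int) (a : Int) ((b : Int) + 1)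
        = bIcy (bRotate (n : Int) (T : Int) data) (n : Int) ((a : Int) + 1) (b : Int)
        + bIcy (bRotate (n : Int) (T : Int) data) (n : Int) ((a : Int) - 1) (b : Int)
        + bIcy (bRotate (n : Int) (T : Int) data) (n : Int) (a : Int) ((b : Int) + 1)
        + bIcy (bRotate (n : Int) (T : Int) data) (n : Int) (a : Int) ((b : Int) - 1) := by ring
    rw [hsum]
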